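-- pv_equiv track=rewrite | github.com/202002538/Baekjoon | 프로그래머스/2/340212. ［PCCP 기출문제］ 2번 ／ 퍼즐 게임 챌린지/［PCCP 기출문제］ 2번 ／ 퍼즐 게임 챌린지.py | solution
-- ===== SOURCE A (Python) =====
-- def solution(diffs, times, limit):
--     start, end = 1, 10**15
--     answer = 0
--
--     while start <= end: #이진탐색
--         mid = (start + end) // 2
--
--         time = 0
--         for i in range(len(diffs)):
--             if diffs[i] <= mid:
--                 time += times[i]
--             else:
--                 time += (diffs[i] - mid) * (times[i] + times[i-1])
--                 time += times[i]
--
--         if time > limit: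
--             start = mid + 1
--         else: #제한시간내 퍼즐 해결 -> mid값 기록해둠
--             answer = mid
--             end = mid - 1
--
--     return answer
-- ===== SOURCE B (Python) =====
-- def solution(diffs, times, limit):
--     n = len(diffs)
--     S = sum(times[:n])
--     if S > limit:
--         return 0
--     pairs = sorted(((diffs[i], times[i] + times[i - 1]) for i in range(n) if diffs[i] > 1), key=lambda p: p[0], reverse=True)
--     m = len(pairs)
--     G = 0  # total weight of puzzles with diff above the current frontier
--     H = 0  # sum of diff*weight for those
--     k = 0
--     while k < m:
--         v = pairs[k][0]
--         while k < m and pairs[k][0] == v: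
--             G += pairs[k][1]
--             H += v * pairs[k][1]
--             k += 1
--         lo = pairs[k][0] if k < m else 1
--         # for levels L in [lo, v-1] the total time is S + H - L*G
--         need = S + H - limit
--         if G > 0:
--             L0 = -(-need // G)  # least L with L*G >= need
--             if L0 >= v:
--                 return v
--             if L0 > lo:
--                 return L0
--         else:
--             if need > 0:
--                 return v
--         # the whole interval is feasible; keep descending
--     return 1
-- ===== Notes on version B (the rewrite author's own statement) =====
-- stated objective: faster
-- what changed: Replaces the binary search (which recomputes the full O(n) total time ~50 times) by one descending sort of the (diff, weight) breakpoints with running sums G, H, solving the linear inequality S + H - L*G <= limit in closed form on each interval between consecutive distinct diff values.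
-- outside the precondition, e.g. on solution([5, 6, 7], [-2, 4, -3], 1): A returns 1, B returns 6
import Mathlib
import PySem

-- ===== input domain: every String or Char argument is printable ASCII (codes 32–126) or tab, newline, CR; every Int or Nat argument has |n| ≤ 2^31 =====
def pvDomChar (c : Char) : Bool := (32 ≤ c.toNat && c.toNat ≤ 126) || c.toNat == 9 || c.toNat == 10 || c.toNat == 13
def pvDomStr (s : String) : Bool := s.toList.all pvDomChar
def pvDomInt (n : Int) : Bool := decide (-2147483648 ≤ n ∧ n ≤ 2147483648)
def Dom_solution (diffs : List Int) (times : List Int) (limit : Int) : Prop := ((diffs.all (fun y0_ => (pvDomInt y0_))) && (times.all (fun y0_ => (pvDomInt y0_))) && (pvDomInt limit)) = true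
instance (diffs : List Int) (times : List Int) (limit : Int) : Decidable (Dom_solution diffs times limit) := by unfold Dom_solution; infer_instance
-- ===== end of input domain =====

-- B replaces A's binary search (each probe recomputing the whole O(n) total time) by one descending sort of the
-- (diff, weight) breakpoints and a single scan solving the linear inequality in closed form on each interval.

-- ===== PORT A =====

-- the inner 'for i in range(len(diffs))' accumulation of A, at a candidate level `mid`
def timeLoopA (diffs times : List Int) (mid : Int) : Int :=
  (PySem.List.pyRange 0 (diffs.length : Int) 1).foldl (fun time i =>
    if PySem.List.pyGetD diffs i 0 ≤ mid then
      time + PySem.List.pyGetD times i 0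
    else
      time + (PySem.List.pyGetD diffs i 0 - mid) *
          (PySem.List.pyGetD times i 0 + PySem.List.pyGetD times (i - 1) 0) +
        PySem.List.pyGetD times i 0) 0

-- A's 'while start <= end' binary search
def bsearchA (diffs times : List Int) (limit : Int) (start end_ answer : Int) : Int :=
  if h : start ≤ end_ then
    let mid := PySem.Int.floordiv (start + end_) 2
    if timeLoopA diffs times mid > limit then
      bsearchA diffs times limit (mid + 1) end_ answer
    else
      bsearchA diffs times limit start (mid - 1) mid
  else
    answer
termination_by (end_ + 1 - start).toNat
decreasing_by
  · have hb := PySem.Int.floordiv_two_mid_bounds h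
    omega
  · have hb := PySem.Int.floordiv_two_mid_bounds h
    omega

def solution (diffs : List Int) (times : List Int) (limit : Int) : Int :=
  bsearchA diffs times limit 1 (10 ^ 15) 0

-- ===== PORT B =====

-- the (diffs[i], times[i] + times[i-1]) pairs with diffs[i] > 1, in index order (B's generator expression)
def pairsB (diffs times : List Int) : List (Int × Int) :=
  (PySem.List.pyRange 0 (diffs.length : Int) 1).filterMap (fun i =>
    if 1 < PySem.List.pyGetD diffs i 0 then
      some (PySem.List.pyGetD diffs i 0,
            PySem.List.pyGetD times i 0 + PySem.List.pyGetD times (i - 1) 0)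
    else none)

-- B's inner 'while k < m and pairs[k][0] == v' group accumulation: returns (G, H, remaining pairs)
def groupB (v : Int) : List (Int × Int) → Int → Int → Int × Int × List (Int × Int)
  | [], G, H => (G, H, [])
  | (d, w) :: rest, G, H =>
    if d = v then groupB v rest (G + w) (H + v * w) else (G, H, (d, w) :: rest)

-- termination measure fact for scanB (cited in its decreasing_by)
theorem groupB_len_le (v : Int) : ∀ (l : List (Int × Int)) (G H : Int),
    ((groupB v l G H).2.2).length ≤ l.length := by
  intro l
  induction l with
  | nil => intro G H; simp [groupB]
  | cons p rest ih =>
    intro G H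
    obtain ⟨d, w⟩ := p
    by_cases hd : d = v
    · simpa [groupB, hd] using Nat.le_succ_of_le (ih (G + w) (H + v * w))
    · simp [groupB, hd]

-- B's outer 'while k < m' loop over the descending-sorted pairs
def scanB (S limit : Int) (G H : Int) : List (Int × Int) → Int
  | [] => 1
  | (v, w) :: rest =>
    let r := groupB v rest (G + w) (H + v * w)
    let lo : Int := match r.2.2 with | [] => 1 | (d, _) :: _ => d
    let need := S + r.2.1 - limit
    if 0 < r.1 then
      let L0 := -PySem.Int.floordiv (-need) r.1
      if v ≤ L0 then v
      else if lo < L0 then L0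
      else scanB S limit r.1 r.2.1 r.2.2
    else if 0 < need then v
    else scanB S limit r.1 r.2.1 r.2.2
termination_by l => l.length
decreasing_by
  · exact Nat.lt_succ_of_le (groupB_len_le v rest (G + w) (H + v * w))
  · exact Nat.lt_succ_of_le (groupB_len_le v rest (G + w) (H + v * w))

def solution_alt (diffs : List Int) (times : List Int) (limit : Int) : Int :=
  let S := (times.take diffs.length).sum
  if limit < S then 0
  else scanB S limit 0 0 (PySem.List.sorted (pairsB diffs times) (fun p => p.1) true)

-- ===== PRECONDITION & SPEC =====

-- the wrap-around weight times[i] + times[i-1] of puzzle i (times[-1] is the last element)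
def pvWeight (times : List Int) (i : Nat) : Int :=
  times.getD i 0 + (if i = 0 then times.getD (times.length - 1) 0 else times.getD (i - 1) 0)

-- sum of the weights of all puzzles whose diff is at least v
def pvSuffix (diffs times : List Int) (v : Int) : Int :=
  ((List.range diffs.length).map (fun i =>
    if v ≤ diffs.getD i 0 then pvWeight times i else 0)).sum

-- Pre_ excludes (a) inputs where A raises an IndexError (times shorter than diffs), and (b) inputs some of whose
-- wrap-around weight suffix sums are negative, making the total time non-monotone in the level: there the value
-- A's binary search returns is an accident of its probe sequence rather than a minimal feasible level.
def Pre_solution (diffs : List Int) (times : List Int) (limit : Int) : Prop :=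
  diffs.length ≤ times.length ∧ ∀ v ∈ diffs, 0 ≤ pvSuffix diffs times v

instance (diffs : List Int) (times : List Int) (limit : Int) : Decidable (Pre_solution diffs times limit) := by
  unfold Pre_solution; infer_instance

def pvWitness_solution : List Int × List Int × Int := ([3, 1], [2, 4], 5)

def Spec_solution (diffs : List Int) (times : List Int) (limit : Int) (out : Int) : Prop :=
  out = solution_alt diffs times limit

instance (diffs : List Int) (times : List Int) (limit : Int) (out : Int) : Decidable (Spec_solution diffs times limit out) := by
  unfold Spec_solution; infer_instance

-- ===== CLAIM (what is proved, stated in full; the proofs are below) =====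
def Claim_equal_solution : Prop := ∀ (diffs : List Int) (times : List Int) (limit : Int), Dom_solution diffs times limit → Pre_solution diffs times limit → Spec_solution diffs times limit (solution diffs times limit)

-- ===== LEMMAS AND PROOFS =====

def pvBIG : Int := 10 ^ 15

-- the exact total time A computes at level L, as a map-sum
def Ftot (diffs times : List Int) (L : Int) : Int :=
  ((List.range diffs.length).map (fun i =>
    if diffs.getD i 0 ≤ L then times.getD i 0
    else (diffs.getD i 0 - L) * pvWeight times i + times.getD i 0)).sum

-- sum of weights of puzzles with diff strictly above L
def pvGsum (diffs times : List Int) (L : Int) : Int :=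
  ((List.range diffs.length).map (fun i =>
    if L < diffs.getD i 0 then pvWeight times i else 0)).sum

-- the clean form of pairsB
def pvPairs (diffs times : List Int) : List (Int × Int) :=
  (List.range diffs.length).filterMap (fun i =>
    if 1 < diffs.getD i 0 then some (diffs.getD i 0, pvWeight times i) else none)

def pvTsum (l : List (Int × Int)) (L : Int) : Int :=
  (l.map (fun p => if L < p.1 then (p.1 - L) * p.2 else 0)).sum
def pvUsum (l : List (Int × Int)) (L : Int) : Int :=
  (l.map (fun p => if L < p.1 then p.2 else 0)).sum
def pvW (l : List (Int × Int)) : Int := (l.map (fun p => p.2)).sum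
def pvWV (l : List (Int × Int)) : Int := (l.map (fun p => p.1 * p.2)).sum

-- both return values characterised: 0 when no level in [1, 10^15] fits, else the least fitting level
def pvChar (diffs times : List Int) (limit r : Int) : Prop :=
  (r = 0 ∧ ∀ L, 1 ≤ L → L ≤ pvBIG → ¬ Ftot diffs times L ≤ limit) ∨
  (1 ≤ r ∧ r ≤ pvBIG ∧ Ftot diffs times r ≤ limit ∧
    ∀ L, 1 ≤ L → L < r → ¬ Ftot diffs times L ≤ limit)

-- the local form B's scan establishes
def pvLC (diffs times : List Int) (limit r : Int) : Prop :=
  1 ≤ r ∧ r ≤ pvBIG ∧ Ftot diffs times r ≤ limit ∧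
    (r = 1 ∨ ¬ Ftot diffs times (r - 1) ≤ limit)

-- head key of the not-yet-consumed sorted pairs (1 once exhausted)
def pvHK : List (Int × Int) → Int
  | [] => 1
  | p :: _ => p.1

theorem Tsum_zero (l : List (Int × Int)) (L : Int) (h : ∀ p ∈ l, p.1 ≤ L) :
    pvTsum l L = 0 := by
  apply List.sum_eq_zero
  intro x hx
  obtain ⟨p, hp, rfl⟩ := List.mem_map.mp hx
  simp [not_lt.mpr (h p hp)]

theorem Usum_zero (l : List (Int × Int)) (L : Int) (h : ∀ p ∈ l, p.1 ≤ L) :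
    pvUsum l L = 0 := by
  apply List.sum_eq_zero
  intro x hx
  obtain ⟨p, hp, rfl⟩ := List.mem_map.mp hx
  simp [not_lt.mpr (h p hp)]

theorem Usum_full (l : List (Int × Int)) (L : Int) (h : ∀ p ∈ l, L < p.1) :
    pvUsum l L = pvW l := by
  unfold pvUsum pvW
  congr 1
  exact List.map_congr_left (fun p hp => by simp [h p hp])

theorem sum_range_getD (l : List Int) (n : Nat) (h : n ≤ l.length) :
    ((List.range n).map (fun i => l.getD i 0)).sum = (l.take n).sum := by
  induction n with
  | zero => simp
  | succ n ih =>
    have hn : n < l.length := by omega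
    rw [List.range_succ, List.map_append, List.sum_append, ih (by omega),
      List.sum_take_succ l n hn]
    simp [l.getElem?_eq_getElem hn]

theorem Tsum_lin (l : List (Int × Int)) (L : Int) (h : ∀ p ∈ l, L < p.1) :
    pvTsum l L = pvWV l - L * pvW l := by
  unfold pvTsum pvWV pvW
  rw [List.map_congr_left (g := fun p : Int × Int => p.1 * p.2 + (-L) * p.2)
    (fun p hp => by rw [if_pos (h p hp)]; ring)]
  rw [PySem.List.sum_map_add_int, List.sum_map_mul_left]
  ring

theorem pyGetD_bridge (times : List Int) (i : Nat) (hne : times ≠ []) :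
    PySem.List.pyGetD times ((i : Int) - 1) 0 =
      (if i = 0 then times.getD (times.length - 1) 0 else times.getD (i - 1) 0) := by
  cases i with
  | zero =>
    simp only [Nat.cast_zero, zero_sub]
    rw [PySem.List.pyGetD_neg_one times 0 hne, List.getLast_eq_getElem]
    have hl : times.length - 1 < times.length := by cases times <;> simp_all
    simp [times.getElem?_eq_getElem hl]
  | succ k =>
    have : ((k + 1 : Nat) : Int) - 1 = (k : Int) := by push_cast; ring
    rw [this, PySem.List.pyGetD_natCast]
    simp

theorem timeLoopA_eq (diffs times : List Int) (mid : Int)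
    (ht : diffs.length ≤ times.length) :
    timeLoopA diffs times mid = Ftot diffs times mid := by
  unfold timeLoopA Ftot
  rw [List.foldl_ext _ (fun (time : Int) (i : Int) =>
        time + (if PySem.List.pyGetD diffs i 0 ≤ mid then PySem.List.pyGetD times i 0
          else (PySem.List.pyGetD diffs i 0 - mid) *
            (PySem.List.pyGetD times i 0 + PySem.List.pyGetD times (i - 1) 0) +
            PySem.List.pyGetD times i 0)) 0
      (by intro a x hx; by_cases h : PySem.List.pyGetD diffs x 0 ≤ mid <;> simp [h] <;> ring)]
  rw [PySem.List.foldl_add, PySem.List.pyRange_zero, Int.toNat_natCast, List.map_map,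
    zero_add]
  apply congrArg
  apply List.map_congr_left
  intro i hi
  have hi' : i < diffs.length := List.mem_range.mp hi
  have hne : times ≠ [] := by
    intro h
    subst h
    simp only [List.length_nil, Nat.le_zero] at ht
    omega
  simp only [Function.comp_apply, PySem.List.pyGetD_natCast,
    pyGetD_bridge times i hne, pvWeight]

theorem pairsB_eq (diffs times : List Int) (ht : diffs.length ≤ times.length) :
    pairsB diffs times = pvPairs diffs times := by
  unfold pairsB pvPairs
  rw [PySem.List.pyRange_zero, Int.toNat_natCast, List.filterMap_map]
  apply List.filterMap_congr
  intro i hi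
  have hi' : i < diffs.length := List.mem_range.mp hi
  have hne : times ≠ [] := by
    intro h
    subst h
    simp only [List.length_nil, Nat.le_zero] at ht
    omega
  simp only [Function.comp_apply, PySem.List.pyGetD_natCast,
    pyGetD_bridge times i hne, pvWeight]

-- sum of a function over a filterMap, as a sum over the source list

theorem sum_map_filterMap {α : Type} (l : List α) (f : α → Option (Int × Int))
    (g : Int × Int → Int) :
    ((l.filterMap f).map g).sum
      = (l.map (fun x => match f x with | some p => g p | none => 0)).sum := by
  induction l with
  | nil => simp
  | cons a l ih =>
    cases hfa : f a <;> simp [hfa, ih]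

theorem Ftot_split (diffs times : List Int) (L : Int) (ht : diffs.length ≤ times.length)
    (hL : 1 ≤ L) :
    Ftot diffs times L = (times.take diffs.length).sum + pvTsum (pvPairs diffs times) L := by
  unfold Ftot pvTsum pvPairs
  rw [sum_map_filterMap, ← sum_range_getD times diffs.length ht,
    ← PySem.List.sum_map_add_int]
  apply congrArg
  apply List.map_congr_left
  intro i hi
  simp only [List.getD]
  by_cases h2 : (diffs[i]?.getD 0 : Int) ≤ L
  · have h3 : ¬ L < diffs[i]?.getD 0 := not_lt.mpr h2
    by_cases h1 : (1 : Int) < diffs[i]?.getD 0 <;> simp [h1, h2, h3]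
  · have h1 : (1 : Int) < diffs[i]?.getD 0 := by omega
    have h3 : L < diffs[i]?.getD 0 := not_le.mp h2
    simp [h1, h2, h3]
    ring

theorem Gsum_eq_Usum (diffs times : List Int) (L : Int) (hL : 1 ≤ L) :
    pvGsum diffs times L = pvUsum (pvPairs diffs times) L := by
  unfold pvGsum pvUsum pvPairs
  rw [sum_map_filterMap]
  apply congrArg
  apply List.map_congr_left
  intro i hi
  simp only [List.getD]
  by_cases h1 : (1 : Int) < diffs[i]?.getD 0 <;> by_cases h2 : L < diffs[i]?.getD 0 <;>
    simp [h1, h2] <;> omega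

theorem Ftot_step (diffs times : List Int) (L : Int) :
    Ftot diffs times L = Ftot diffs times (L + 1) + pvGsum diffs times L := by
  unfold Ftot pvGsum
  rw [← PySem.List.sum_map_add_int]
  apply congrArg
  apply List.map_congr_left
  intro i hi
  simp only [List.getD]
  by_cases h1 : (diffs[i]?.getD 0 : Int) ≤ L
  · simp [h1, show (diffs[i]?.getD 0 : Int) ≤ L + 1 by omega,
      show ¬ L < (diffs[i]?.getD 0 : Int) by omega]
  · by_cases h2 : (diffs[i]?.getD 0 : Int) ≤ L + 1
    · have h3 : (diffs[i]?.getD 0 : Int) = L + 1 := by omega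
      simp [h3, show L < L + 1 by omega]
      ring
    · simp [h1, h2, show L < (diffs[i]?.getD 0 : Int) by omega]
      ring

theorem Gsum_nonneg (diffs times : List Int)
    (hpre : ∀ v ∈ diffs, 0 ≤ pvSuffix diffs times v) (L : Int) :
    0 ≤ pvGsum diffs times L := by
  by_cases hex : ∃ x ∈ diffs, L < x
  · have hne : (diffs.filter (fun x => decide (L < x))) ≠ [] := by
      obtain ⟨x, hx, hLx⟩ := hex
      have : x ∈ diffs.filter (fun x => decide (L < x)) := by
        simp [List.mem_filter, hx, hLx]
      intro h; rw [h] at this; simp at this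
    cases hmin : (diffs.filter (fun x => decide (L < x))).min? with
    | none => rw [List.min?_eq_none_iff] at hmin; exact absurd hmin hne
    | some v =>
      obtain ⟨hmem, hle⟩ := List.min?_eq_some_iff.mp hmin
      have hvd : v ∈ diffs := (List.mem_filter.mp hmem).1
      have hLv : L < v := by have := (List.mem_filter.mp hmem).2; simpa using this
      have heq : pvGsum diffs times L = pvSuffix diffs times v := by
        unfold pvGsum pvSuffix
        apply congrArg
        apply List.map_congr_left
        intro i hi
        have hi' : i < diffs.length := List.mem_range.mp hi
        have hmemd : diffs.getD i 0 ∈ diffs := by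
          rw [List.getD_eq_getElem diffs 0 hi']; exact List.getElem_mem hi'
        by_cases hc : L < diffs.getD i 0
        · have hv2 : v ≤ diffs.getD i 0 :=
            hle _ (List.mem_filter.mpr ⟨hmemd, by simpa using hc⟩)
          rw [if_pos hc, if_pos hv2]
        · rw [if_neg hc, if_neg (by omega)]
      rw [heq]
      exact hpre v hvd
  · have hex' : ∀ x ∈ diffs, x ≤ L := by
      intro x hx
      by_contra hLx
      exact hex ⟨x, hx, by omega⟩
    have : pvGsum diffs times L = 0 := by
      unfold pvGsum
      apply List.sum_eq_zero
      intro x hx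
      obtain ⟨i, hi, rfl⟩ := List.mem_map.mp hx
      have hi' : i < diffs.length := List.mem_range.mp hi
      have : diffs.getD i 0 ∈ diffs := by
        rw [List.getD_eq_getElem diffs 0 hi']; exact List.getElem_mem hi'
      rw [if_neg (not_lt.mpr (hex' _ this))]
    omega

theorem Ftot_antitone (diffs times : List Int)
    (hpre : ∀ v ∈ diffs, 0 ≤ pvSuffix diffs times v) :
    ∀ L M : Int, L ≤ M → Ftot diffs times M ≤ Ftot diffs times L := by
  have hstep : ∀ (k : Nat) (L : Int), Ftot diffs times (L + k) ≤ Ftot diffs times L := by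
    intro k
    induction k with
    | zero => intro L; simp
    | succ k ih =>
      intro L
      have h1 : Ftot diffs times (L + 1 + k) ≤ Ftot diffs times (L + 1) := ih (L + 1)
      have h2 : Ftot diffs times L = Ftot diffs times (L + 1) + pvGsum diffs times L :=
        Ftot_step diffs times L
      have h3 := Gsum_nonneg diffs times hpre L
      have h4 : (L + (k + 1 : Nat) : Int) = L + 1 + k := by push_cast; ring
      rw [h4]
      omega
  intro L M h
  have h4 : (L + ((M - L).toNat : Int)) = M := by omega
  have := hstep (M - L).toNat L
  rw [h4] at this
  exact this

theorem groupB_spec (v : Int) : ∀ (l : List (Int × Int)) (G H : Int),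
    List.Pairwise (fun a b : Int × Int => b.1 ≤ a.1) l →
    (∀ p ∈ l, p.1 ≤ v) →
    ∃ grp r', l = grp ++ r' ∧ (∀ p ∈ grp, p.1 = v) ∧ (∀ p ∈ r', p.1 < v) ∧
      groupB v l G H = (G + pvW grp, H + v * pvW grp, r') := by
  intro l
  induction l with
  | nil =>
    intro G H _ _
    exact ⟨[], [], by simp, by simp, by simp, by simp [groupB, pvW]⟩
  | cons p rest ih =>
    intro G H hpw hub
    obtain ⟨d, w⟩ := p
    by_cases hd : d = v
    · obtain ⟨grp, r', heq, hgrp, hr', hgb⟩ := ih (G + w) (H + v * w) hpw.of_cons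
        (fun q hq => le_trans (List.rel_of_pairwise_cons hpw hq) (hub _ (.head _)))
      refine ⟨(d, w) :: grp, r', by simp [heq], ?_, hr', ?_⟩
      · intro q hq
        rcases List.mem_cons.mp hq with h | h
        · rw [h, hd]
        · exact hgrp q h
      · rw [groupB, if_pos hd, hgb]
        have h1 : G + w + pvW grp = G + pvW ((d, w) :: grp) := by simp [pvW]; ring
        have h2 : H + v * w + v * pvW grp = H + v * pvW ((d, w) :: grp) := by
          simp [pvW]; ring
        rw [h1, h2]
    · have hdv : d < v := lt_of_le_of_ne (hub _ (.head _)) hd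
      refine ⟨[], (d, w) :: rest, by simp, by simp, ?_, by simp [groupB, hd, pvW]⟩
      intro q hq
      rcases List.mem_cons.mp hq with h | h
      · rw [h]; exact hdv
      · exact lt_of_le_of_lt (List.rel_of_pairwise_cons hpw h) hdv

theorem Tsum_append (a b : List (Int × Int)) (L : Int) :
    pvTsum (a ++ b) L = pvTsum a L + pvTsum b L := by simp [pvTsum]

theorem Usum_append (a b : List (Int × Int)) (L : Int) :
    pvUsum (a ++ b) L = pvUsum a L + pvUsum b L := by simp [pvUsum]

theorem WV_const (v : Int) (l : List (Int × Int)) (h : ∀ p ∈ l, p.1 = v) :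
    pvWV l = v * pvW l := by
  unfold pvWV pvW
  rw [← List.sum_map_mul_left]
  exact congrArg _ (List.map_congr_left (fun p hp => by rw [h p hp]))

theorem Tsum_perm (a b : List (Int × Int)) (L : Int) (h : a.Perm b) :
    pvTsum a L = pvTsum b L := (h.map _).sum_eq

theorem Usum_perm (a b : List (Int × Int)) (L : Int) (h : a.Perm b) :
    pvUsum a L = pvUsum b L := (h.map _).sum_eq

theorem scanB_cons (S limit G H v w : Int) (rest : List (Int × Int))
    (G' H' : Int) (r' : List (Int × Int))
    (hgb : groupB v rest (G + w) (H + v * w) = (G', H', r')) :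
    scanB S limit G H ((v, w) :: rest) =
      (if 0 < G' then
        (if v ≤ -PySem.Int.floordiv (-(S + H' - limit)) G' then v
         else if pvHK r' < -PySem.Int.floordiv (-(S + H' - limit)) G' then
           -PySem.Int.floordiv (-(S + H' - limit)) G'
         else scanB S limit G' H' r')
       else if 0 < S + H' - limit then v
       else scanB S limit G' H' r') := by
  rw [scanB, hgb]
  cases r' with
  | nil => rfl
  | cons q t => rcases q with ⟨d, u⟩; rfl

theorem scanB_char (diffs times : List Int) (limit S : Int) (sp : List (Int × Int))
    (hpre : ∀ v ∈ diffs, 0 ≤ pvSuffix diffs times v)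
    (hpair : List.Pairwise (fun a b : Int × Int => b.1 ≤ a.1) sp)
    (hkeys : ∀ p ∈ sp, 1 < p.1 ∧ p.1 ≤ 2147483648)
    (hiden : ∀ L : Int, 1 ≤ L → Ftot diffs times L = S + pvTsum sp L)
    (hperm : sp.Perm (pvPairs diffs times)) :
    ∀ (N : Nat) (rest cpre : List (Int × Int)), rest.length ≤ N →
      sp = cpre ++ rest →
      (∀ a ∈ cpre, pvHK rest < a.1) →
      Ftot diffs times (pvHK rest) ≤ limit →
      pvLC diffs times limit (scanB S limit (pvW cpre) (pvWV cpre) rest) := by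
  intro N
  induction N with
  | zero =>
    intro rest cpre hlen hsp hsep hfeas
    have : rest = [] := List.length_eq_zero_iff.mp (by omega)
    subst this
    rw [scanB]
    exact ⟨le_refl 1, by unfold pvBIG; norm_num, hfeas, Or.inl rfl⟩
  | succ N ih =>
    intro rest cpre hlen hsp hsep hfeas
    cases rest with
    | nil =>
      rw [scanB]
      exact ⟨le_refl 1, by unfold pvBIG; norm_num, hfeas, Or.inl rfl⟩
    | cons p tl =>
      obtain ⟨v, w⟩ := p
      have hmemv : (v, w) ∈ sp := by rw [hsp]; exact List.mem_append_right _ (.head _)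
      have hv1 : 1 < v := (hkeys _ hmemv).1
      have hvB : v ≤ 2147483648 := (hkeys _ hmemv).2
      have hBIG : (2147483648 : Int) < pvBIG := by unfold pvBIG; norm_num
      have hrest_pw : List.Pairwise (fun a b : Int × Int => b.1 ≤ a.1) ((v, w) :: tl) :=
        ((List.pairwise_append.mp (hsp ▸ hpair)).2.1)
      have hub : ∀ q ∈ tl, q.1 ≤ v := fun q hq => List.rel_of_pairwise_cons hrest_pw hq
      obtain ⟨grp, r', heqtl, hgrp, hr', hgb⟩ :=
        groupB_spec v tl (pvW cpre + w) (pvWV cpre + v * w) hrest_pw.of_cons hub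
      set cpre' := cpre ++ (v, w) :: grp with hcpre'
      have hW' : pvW cpre' = pvW cpre + w + pvW grp := by
        simp only [hcpre', pvW, List.map_append, List.sum_append, List.map_cons,
          List.sum_cons]
        ring
      have hWV' : pvWV cpre' = pvWV cpre + v * w + v * pvW grp := by
        have hwv := WV_const v grp hgrp
        simp only [hcpre', pvWV, List.map_append, List.sum_append, List.map_cons,
          List.sum_cons] at *
        rw [hwv]
        ring
      have hsp' : sp = cpre' ++ r' := by rw [hsp, heqtl, hcpre']; simp
      have hlo1 : 1 ≤ pvHK r' := by
        cases r' with
        | nil => exact le_refl 1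
        | cons q t =>
          have : q ∈ sp := by rw [hsp']; exact List.mem_append_right _ (.head _)
          have := (hkeys q this).1
          show 1 ≤ q.1
          omega
      have hlov : pvHK r' < v := by
        cases r' with
        | nil => exact hv1
        | cons q t => exact hr' q (.head _)
      have hr'le : ∀ q ∈ r', q.1 ≤ pvHK r' := by
        cases r' with
        | nil => intro q hq; cases hq
        | cons a t =>
          intro q hq
          rcases List.mem_cons.mp hq with h | h
          · rw [h]; exact le_refl a.1
          · have hpw' : List.Pairwise (fun a b : Int × Int => b.1 ≤ a.1) (a :: t) :=
              (List.pairwise_append.mp (hsp' ▸ hpair)).2.1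
            exact List.rel_of_pairwise_cons hpw' h
      have hcpre'ge : ∀ a ∈ cpre', v ≤ a.1 := by
        intro a ha
        rcases List.mem_append.mp ha with h | h
        · exact le_of_lt (hsep a h)
        · rcases List.mem_cons.mp h with h | h
          · rw [h]
          · rw [hgrp a h]
      have hlin : ∀ L : Int, pvHK r' ≤ L → L ≤ v - 1 →
          Ftot diffs times L = S + (pvWV cpre' - L * pvW cpre') := by
        intro L h1 h2
        rw [hiden L (le_trans hlo1 h1), hsp', Tsum_append,
          Tsum_lin cpre' L (fun p hp => lt_of_le_of_lt (by omega) (lt_of_lt_of_le (by omega : (v:Int) - 1 < v) (hcpre'ge p hp))),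
          Tsum_zero r' L (fun p hp => le_trans (hr'le p hp) h1)]
        ring
      have hG0 : 0 ≤ pvW cpre' := by
        have h1 : pvUsum sp (v - 1) = pvW cpre' := by
          rw [hsp', Usum_append,
            Usum_full cpre' (v - 1) (fun p hp => lt_of_lt_of_le (by omega) (hcpre'ge p hp)),
            Usum_zero r' (v - 1) (fun p hp => by have := hr'le p hp; omega)]
          ring
        have h2 := Gsum_eq_Usum diffs times (v - 1) (by omega)
        have h3 := Usum_perm sp (pvPairs diffs times) (v - 1) hperm
        have h4 := Gsum_nonneg diffs times hpre (v - 1)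
        omega
      have hfeas_iff : ∀ L : Int, pvHK r' ≤ L → L ≤ v - 1 →
          (Ftot diffs times L ≤ limit ↔ S + pvWV cpre' - limit ≤ L * pvW cpre') := by
        intro L h1 h2
        rw [hlin L h1 h2]
        constructor <;> intro h <;> linarith
      -- unfold one step of scanB
      have hlen' : r'.length ≤ N := by
        have h5 := congrArg List.length heqtl
        simp only [List.length_append] at h5
        simp only [List.length_cons] at hlen
        omega
      have hsep' : ∀ a ∈ cpre', pvHK r' < a.1 :=
        fun a ha => lt_of_lt_of_le hlov (hcpre'ge a ha)
      rw [scanB_cons S limit (pvW cpre) (pvWV cpre) v w tl _ _ _ hgb,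
        ← hW', ← hWV']
      by_cases hGpos : 0 < pvW cpre'
      · rw [if_pos hGpos]
        have hceil := (PySem.Int.neg_floordiv_neg_eq_iff_of_pos hGpos).mp
          (rfl : -PySem.Int.floordiv (-(S + pvWV cpre' - limit)) (pvW cpre') =
            -PySem.Int.floordiv (-(S + pvWV cpre' - limit)) (pvW cpre'))
        obtain ⟨hceil1, hceil2⟩ := hceil
        set L0 := -PySem.Int.floordiv (-(S + pvWV cpre' - limit)) (pvW cpre') with hL0
        by_cases hvle : v ≤ L0
        · rw [if_pos hvle]
          refine ⟨by omega, by omega, hfeas, Or.inr ?_⟩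
          rw [hfeas_iff (v - 1) (by omega) (by omega)]
          intro hcon
          have hmul := mul_le_mul_of_nonneg_right (show v - 1 ≤ L0 - 1 by omega)
            (le_of_lt hGpos)
          linarith
        · rw [if_neg hvle]
          by_cases hlo' : pvHK r' < L0
          · rw [if_pos hlo']
            refine ⟨by omega, by omega, ?_, Or.inr ?_⟩
            · rw [hfeas_iff L0 (by omega) (by omega)]
              linarith
            · rw [hfeas_iff (L0 - 1) (by omega) (by omega)]
              intro hcon
              linarith
          · rw [if_neg hlo']
            apply ih r' cpre' hlen' hsp' hsep'
            rw [hfeas_iff (pvHK r') (le_refl _) (by omega)]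
            have hmul := mul_le_mul_of_nonneg_right (show L0 ≤ pvHK r' by omega)
              (le_of_lt hGpos)
            linarith
      · rw [if_neg hGpos]
        have hGz : pvW cpre' = 0 := by omega
        by_cases hneedpos : 0 < S + pvWV cpre' - limit
        · rw [if_pos hneedpos]
          refine ⟨by omega, by omega, hfeas, Or.inr ?_⟩
          have hl := hlin (v - 1) (by omega) (by omega)
          rw [hGz] at hl
          simp only [mul_zero, sub_zero] at hl
          rw [hl]
          intro hcon
          linarith
        · rw [if_neg hneedpos]
          apply ih r' cpre' hlen' hsp' hsep'
          have hl := hlin (pvHK r') (le_refl _) (by omega)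
          rw [hGz] at hl
          simp only [mul_zero, sub_zero] at hl
          rw [hl]
          linarith

theorem LC_to_char (diffs times : List Int) (limit r : Int)
    (hpre : ∀ v ∈ diffs, 0 ≤ pvSuffix diffs times v)
    (h : pvLC diffs times limit r) : pvChar diffs times limit r := by
  obtain ⟨h1, h2, h3, h4⟩ := h
  refine Or.inr ⟨h1, h2, h3, ?_⟩
  intro L hL1 hL2 hcon
  rcases h4 with h4 | h4
  · omega
  · exact h4 (le_trans (Ftot_antitone diffs times hpre L (r - 1) (by omega)) hcon)

theorem pvPairs_keys (diffs times : List Int) (limit : Int)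
    (hdom : Dom_solution diffs times limit) :
    ∀ p ∈ pvPairs diffs times, 1 < p.1 ∧ p.1 ≤ 2147483648 := by
  intro p hp
  obtain ⟨i, hi, hfi⟩ := List.mem_filterMap.mp hp
  have hi' : i < diffs.length := List.mem_range.mp hi
  by_cases h1 : 1 < diffs.getD i 0
  · rw [if_pos h1] at hfi
    obtain rfl := Option.some_injective _ hfi
    refine ⟨h1, ?_⟩
    have hmem : diffs.getD i 0 ∈ diffs := by
      rw [List.getD_eq_getElem diffs 0 hi']
      exact List.getElem_mem hi'
    have hall : diffs.all (fun y => pvDomInt y) = true := by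
      unfold Dom_solution at hdom
      simp only [Bool.and_eq_true] at hdom
      exact hdom.1.1
    have := List.all_eq_true.mp hall _ hmem
    unfold pvDomInt at this
    have := of_decide_eq_true this
    exact this.2
  · rw [if_neg h1] at hfi
    cases hfi

theorem charB (diffs times : List Int) (limit : Int)
    (hdom : Dom_solution diffs times limit) (hpre : Pre_solution diffs times limit) :
    pvChar diffs times limit (solution_alt diffs times limit) := by
  obtain ⟨ht, hpre2⟩ := hpre
  set S := (times.take diffs.length).sum with hS
  set sp := PySem.List.sorted (pairsB diffs times) (fun p => p.1) true with hspdef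
  have hperm : sp.Perm (pvPairs diffs times) := by
    rw [← pairsB_eq diffs times ht]
    exact PySem.List.sorted_perm _ _ _
  have hpair : List.Pairwise (fun a b : Int × Int => b.1 ≤ a.1) sp :=
    PySem.List.sorted_pairwise_rev _ _
  have hkeys : ∀ p ∈ sp, 1 < p.1 ∧ p.1 ≤ 2147483648 := by
    intro p hp
    exact pvPairs_keys diffs times limit hdom p (hperm.mem_iff.mp hp)
  have hiden : ∀ L : Int, 1 ≤ L → Ftot diffs times L = S + pvTsum sp L := by
    intro L hL
    rw [Ftot_split diffs times L ht hL, Tsum_perm sp (pvPairs diffs times) L hperm]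
  have hBIG : (2147483648 : Int) < pvBIG := by unfold pvBIG; norm_num
  have hFBIG : Ftot diffs times pvBIG = S := by
    rw [hiden pvBIG (by omega), Tsum_zero sp pvBIG (fun p hp => by
      have := (hkeys p hp).2; omega)]
    ring
  unfold solution_alt
  rw [← hS, ← hspdef]
  by_cases hlim : limit < S
  · rw [if_pos hlim]
    refine Or.inl ⟨rfl, ?_⟩
    intro L hL1 hL2 hcon
    have := Ftot_antitone diffs times hpre2 L pvBIG hL2
    omega
  · rw [if_neg hlim]
    have hfeas0 : Ftot diffs times (pvHK sp) ≤ limit := by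
      cases hc : sp with
      | nil =>
        show Ftot diffs times 1 ≤ limit
        have hz : pvTsum sp 1 = 0 := by rw [hc]; rfl
        rw [hiden 1 (le_refl 1), hz]
        omega
      | cons q t =>
        show Ftot diffs times (pvHK (q :: t)) ≤ limit
        have hq1 : 1 ≤ q.1 := by
          have := (hkeys q (by rw [hc]; exact .head _)).1
          omega
        show Ftot diffs times q.1 ≤ limit
        rw [hiden q.1 hq1, Tsum_zero sp q.1 (fun p hp => by
          rw [hc] at hp
          have hpair' := hc ▸ hpair
          rcases List.mem_cons.mp hp with h | h
          · rw [h]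
          · exact List.rel_of_pairwise_cons hpair' h)]
        omega
    exact LC_to_char diffs times limit _ hpre2
      (scanB_char diffs times limit S sp hpre2 hpair hkeys hiden hperm sp.length sp []
        (le_refl _) (by simp) (by intro a ha; cases ha) hfeas0)

theorem bsearchA_char (diffs times : List Int) (limit : Int)
    (ht : diffs.length ≤ times.length)
    (hpre : ∀ v ∈ diffs, 0 ≤ pvSuffix diffs times v) :
    ∀ (N : Nat) (start end_ answer : Int), (end_ + 1 - start).toNat ≤ N →
      1 ≤ start → start ≤ end_ + 1 → end_ ≤ pvBIG →
      (∀ L, 1 ≤ L → L < start → ¬ Ftot diffs times L ≤ limit) →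
      (∀ L, end_ < L → L ≤ pvBIG → Ftot diffs times L ≤ limit) →
      answer = (if end_ = pvBIG then 0 else end_ + 1) →
      pvChar diffs times limit (bsearchA diffs times limit start end_ answer) := by
  intro N
  induction N with
  | zero =>
    intro start end_ answer hN h1 h2 h3 hlow hhigh hans
    have hstop : ¬ start ≤ end_ := by omega
    rw [bsearchA, dif_neg hstop]
    by_cases hend : end_ = pvBIG
    · rw [hend] at hans h2
      refine Or.inl ⟨by simpa using hans, ?_⟩
      intro L hL1 hL2
      exact hlow L hL1 (by omega)
    · rw [if_neg hend] at hans
      refine Or.inr ⟨by omega, by omega, ?_, ?_⟩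
      · rw [hans]; exact hhigh (end_ + 1) (by omega) (by omega)
      · intro L hL1 hL2; exact hlow L hL1 (by omega)
  | succ N ih =>
    intro start end_ answer hN h1 h2 h3 hlow hhigh hans
    by_cases hc : start ≤ end_
    · rw [bsearchA, dif_pos hc]
      have hb := PySem.Int.floordiv_two_mid_bounds hc
      set mid := PySem.Int.floordiv (start + end_) 2 with hmid
      change pvChar diffs times limit
        (if timeLoopA diffs times mid > limit then
          bsearchA diffs times limit (mid + 1) end_ answer
        else bsearchA diffs times limit start (mid - 1) mid)
      rw [timeLoopA_eq diffs times mid ht]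
      by_cases htime : Ftot diffs times mid > limit
      · rw [if_pos htime]
        apply ih (mid + 1) end_ answer (by omega) (by omega) (by omega) h3 _ hhigh hans
        intro L hL1 hL2
        by_cases hLs : L < start
        · exact hlow L hL1 hLs
        · intro hcon
          have := Ftot_antitone diffs times hpre L mid (by omega)
          omega
      · rw [if_neg htime]
        apply ih start (mid - 1) mid (by omega) (by omega) (by omega) (by omega) hlow _ _
        · intro L hL1 hL2
          have := Ftot_antitone diffs times hpre mid L (by omega)
          omega
        · rw [if_neg (by omega : ¬ mid - 1 = pvBIG)]
          omega
    · rw [bsearchA, dif_neg hc]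
      by_cases hend : end_ = pvBIG
      · rw [hend] at hans h2
        refine Or.inl ⟨by simpa using hans, ?_⟩
        intro L hL1 hL2
        exact hlow L hL1 (by omega)
      · rw [if_neg hend] at hans
        refine Or.inr ⟨by omega, by omega, ?_, ?_⟩
        · rw [hans]; exact hhigh (end_ + 1) (by omega) (by omega)
        · intro L hL1 hL2; exact hlow L hL1 (by omega)

theorem charA (diffs times : List Int) (limit : Int)
    (hpre : Pre_solution diffs times limit) :
    pvChar diffs times limit (solution diffs times limit) := by
  obtain ⟨ht, hpre2⟩ := hpre
  unfold solution
  have hB : (10 ^ 15 : Int) = pvBIG := rfl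
  rw [hB]
  apply bsearchA_char diffs times limit ht hpre2 (pvBIG.toNat) 1 pvBIG 0
    (by unfold pvBIG; norm_num) (le_refl 1) (by unfold pvBIG; norm_num)
    (le_refl _) (by intro L h1 h2; omega) (by intro L h1 h2; omega)
    (by rw [if_pos rfl])

theorem char_unique (diffs times : List Int) (limit r r' : Int)
    (h : pvChar diffs times limit r) (h' : pvChar diffs times limit r') : r = r' := by
  rcases h with ⟨hz, hall⟩ | ⟨h1, h2, h3, h4⟩
  · rcases h' with ⟨hz', _⟩ | ⟨h1', h2', h3', h4'⟩
    · omega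
    · exact absurd h3' (hall r' h1' h2')
  · rcases h' with ⟨hz', hall'⟩ | ⟨h1', h2', h3', h4'⟩
    · exact absurd h3 (hall' r h1 h2)
    · by_cases hlt : r < r'
      · exact absurd h3 (h4' r h1 hlt)
      · by_cases hlt' : r' < r
        · exact absurd h3' (h4 r' h1' hlt')
        · omega

-- ===== VERDICT (by name: the statement is the Claim_ definition above) =====
theorem solution_spec : Claim_equal_solution := by
  intro diffs times limit hdom hpre
  unfold Spec_solution
  exact char_unique diffs times limit _ _ (charA diffs times limit hpre)
    (charB diffs times limit hdom hpre)
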